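-- pv_equiv track=rewrite | github.com/alexey-goloburdin/japanese-crossword | main.py | _find_sausages_possible_edge_variants
-- ===== SOURCE A (Python) =====
-- def _find_sausages_possible_edge_variants(rules, board_size):
--     """
--     Возвращает «крайние» варианты всех колбасок, если бы они начинались с самого левого или самого правого края для
--     строк, и с самого верхнего или самого нижнего края для колонок.
--     """
--     sausages_variants_in_rows = []  # список строк или колонок с гипотетическими крайними положениями колбасок
--     for rule_row in rules:
--         # гипотетические положения колбасок в текущей строке
--         sausages_variants_in_row = {sausage_index: {"start_variant_coords": tuple(),
--                                                     "end_variant_coords": tuple()}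
--                                     for sausage_index in range(len(rule_row))}
--
--         # Строим левый (от начала строки/колонки) вариант колбас
--         current_cell_index = 0
--         for sausage_index, sausage_length_rule in enumerate(rule_row):
--             sausage_start_cell = current_cell_index
--             sausage_end_cell = current_cell_index + sausage_length_rule - 1
--
--             sausages_variants_in_row[sausage_index]["start_variant_coords"] = (sausage_start_cell, sausage_end_cell)
--             current_cell_index += sausage_length_rule + 1
--
--         # Строим правый (от конца строки/колонки) вариант колбас
--         current_cell_index = board_size - 1
--         for sausage_index, sausage_length_rule in enumerate(reversed(rule_row)): # в обратном порядке берём колбаски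
--             sausage_end_cell = current_cell_index
--             sausage_start_cell = current_cell_index - sausage_length_rule + 1
--
--             sausages_variants_in_row[len(rule_row) - sausage_index - 1]["end_variant_coords"] = \
--                     (sausage_start_cell, sausage_end_cell)
--             current_cell_index -= sausage_length_rule + 1
--
--         sausages_variants_in_rows.append(sausages_variants_in_row)
--     return sausages_variants_in_rows
-- ===== SOURCE B (Python) =====
-- def _find_sausages_possible_edge_variants(rules, board_size):
--     variants_rows = []
--     for rule_row in rules:
--         offset = board_size - (sum(rule_row) + len(rule_row) - 1)
--         row = {}
--         cell = 0
--         for idx, length in enumerate(rule_row):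
--             start, end = cell, cell + length - 1
--             row[idx] = {"start_variant_coords": (start, end),
--                         "end_variant_coords": (start + offset, end + offset)}
--             cell = end + 2
--         variants_rows.append(row)
--     return variants_rows
-- ===== Notes on version B (the rewrite author's own statement) =====
-- stated objective: simpler
-- what changed: B replaces A's three phases per row (dict-comprehension init with placeholder tuples, a forward pass filling start coords, a reversed pass filling end coords) by a single forward pass that emits each entry once, computing the rightmost placement as the leftmost shifted by offset = board_size - (sum(row) + len(row) - 1).
import Mathlib
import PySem

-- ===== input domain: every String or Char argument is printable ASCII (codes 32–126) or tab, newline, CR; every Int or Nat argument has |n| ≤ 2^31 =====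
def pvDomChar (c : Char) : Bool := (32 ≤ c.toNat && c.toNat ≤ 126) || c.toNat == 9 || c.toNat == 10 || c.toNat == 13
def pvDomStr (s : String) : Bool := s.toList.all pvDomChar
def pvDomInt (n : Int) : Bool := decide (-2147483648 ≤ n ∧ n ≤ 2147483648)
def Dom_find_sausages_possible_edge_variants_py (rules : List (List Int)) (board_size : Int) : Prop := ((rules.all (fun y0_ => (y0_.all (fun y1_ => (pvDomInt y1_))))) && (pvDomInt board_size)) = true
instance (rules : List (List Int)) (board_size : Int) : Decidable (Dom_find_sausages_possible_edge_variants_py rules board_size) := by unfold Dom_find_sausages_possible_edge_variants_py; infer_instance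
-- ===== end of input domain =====

-- B replaces A's dict-init pass plus two enumerate passes (forward + reversed) by one forward pass that
-- derives the rightmost packing from the leftmost by a constant shift (simpler decomposition).


-- ===== PORT A =====
-- inner dict update d[key] = (s, e): overwrite in place (key is always present when A assigns)
def pvSetStr (d : List (String × Int × Int)) (key : String) (v : Int × Int) : List (String × Int × Int) :=
  match d with
  | [] => []
  | (k, w) :: rest => if k = key then (k, v.1, v.2) :: rest else (k, w) :: pvSetStr rest key v

-- outer dict update d[k][...] = …: modify the inner dict at key k in place
def pvSetKey (d : List (Int × List (String × Int × Int))) (k : Int)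
    (f : List (String × Int × Int) → List (String × Int × Int)) : List (Int × List (String × Int × Int)) :=
  match d with
  | [] => []
  | (k', v) :: rest => if k' = k then (k', f v) :: rest else (k', v) :: pvSetKey rest k f

-- the comprehension value {"start_variant_coords": tuple(), "end_variant_coords": tuple()}; Python's empty
-- tuple() is not an Int × Int, so (0, 0) stands in — both loops overwrite both fields at every index,
-- so the placeholder never reaches the output
def pvBlank : List (String × Int × Int) :=
  [("start_variant_coords", 0, 0), ("end_variant_coords", 0, 0)]

-- body of A's first (left-edge) loop over enumerate(rule_row); state = (dict, current_cell_index)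
def pvStepL (st : List (Int × List (String × Int × Int)) × Int) (p : Int × Int) :
    List (Int × List (String × Int × Int)) × Int :=
  (pvSetKey st.1 p.1 (fun dd => pvSetStr dd "start_variant_coords" (st.2, st.2 + p.2 - 1)), st.2 + p.2 + 1)

-- body of A's second (right-edge) loop over enumerate(reversed(rule_row)); n = len(rule_row)
def pvStepR (n : Int) (st : List (Int × List (String × Int × Int)) × Int) (p : Int × Int) :
    List (Int × List (String × Int × Int)) × Int :=
  (pvSetKey st.1 (n - p.1 - 1) (fun dd => pvSetStr dd "end_variant_coords" (st.2 - p.2 + 1, st.2)), st.2 - p.2 - 1)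

-- one rule_row of A: dict comprehension over range(len), then the two enumerate loops
def pvRowA (rule_row : List Int) (board_size : Int) : List (Int × List (String × Int × Int)) :=
  let init := (PySem.List.pyRange 0 (rule_row.length : Int) 1).map (fun i => (i, pvBlank))
  let l := (PySem.List.enumerate rule_row).foldl pvStepL (init, 0)
  let r := (PySem.List.enumerate rule_row.reverse).foldl (pvStepR (rule_row.length : Int)) (l.1, board_size - 1)
  r.1

def find_sausages_possible_edge_variants_py (rules : List (List Int)) (board_size : Int) :
    List (List (Int × List (String × Int × Int))) :=
  rules.foldl (fun acc rule_row => acc ++ [pvRowA rule_row board_size]) []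

-- ===== PORT B =====
-- B's single loop: running cell index and index, each entry built once with both coordinate pairs
def pvRowB (lens : List Int) (idx cell off : Int) : List (Int × List (String × Int × Int)) :=
  match lens with
  | [] => []
  | len :: rest =>
      (idx, [("start_variant_coords", cell, cell + len - 1),
             ("end_variant_coords", cell + off, cell + len - 1 + off)]) :: pvRowB rest (idx + 1) (cell + len + 1) off

def find_sausages_possible_edge_variants_py_alt (rules : List (List Int)) (board_size : Int) :
    List (List (Int × List (String × Int × Int))) :=
  rules.map (fun rule_row => pvRowB rule_row 0 0 (board_size - (rule_row.sum + (rule_row.length : Int) - 1)))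

-- ===== PRECONDITION & SPEC =====
def Spec_find_sausages_possible_edge_variants_py (rules : List (List Int)) (board_size : Int) (out : List (List (Int × List (String × Int × Int)))) : Prop := out = find_sausages_possible_edge_variants_py_alt rules board_size
instance (rules : List (List Int)) (board_size : Int) (out : List (List (Int × List (String × Int × Int)))) : Decidable (Spec_find_sausages_possible_edge_variants_py rules board_size out) := by unfold Spec_find_sausages_possible_edge_variants_py; infer_instance

-- ===== CLAIM (what is proved, stated in full; the proofs are below) =====
def Claim_equal_find_sausages_possible_edge_variants_py : Prop := ∀ (rules : List (List Int)) (board_size : Int), Dom_find_sausages_possible_edge_variants_py rules board_size → Spec_find_sausages_possible_edge_variants_py rules board_size (find_sausages_possible_edge_variants_py rules board_size)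

-- ===== LEMMAS AND PROOFS =====

-- total span cost of a block list: Σ (len + 1)
def pvS (lens : List Int) : Int :=
  match lens with
  | [] => 0
  | len :: rest => len + 1 + pvS rest

-- the dict after A's left loop: keys a, a+1, …; start coords filled, end coords still the placeholder
def pvSpecL (lens : List Int) (a cell : Int) : List (Int × List (String × Int × Int)) :=
  match lens with
  | [] => []
  | len :: rest =>
      (a, [("start_variant_coords", cell, cell + len - 1), ("end_variant_coords", 0, 0)]) :: pvSpecL rest (a + 1) (cell + len + 1)

-- A's initial comprehension dict, recursively
def pvInit (lens : List Int) (a : Int) : List (Int × List (String × Int × Int)) :=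
  match lens with
  | [] => []
  | _ :: rest => (a, pvBlank) :: pvInit rest (a + 1)

theorem pvS_eq (lens : List Int) : pvS lens = lens.sum + (lens.length : Int) := by
  induction lens with
  | nil => simp [pvS]
  | cons x r ih => simp [pvS, ih]; ring

theorem pvInit_eq (lens : List Int) (a : Int) :
    (PySem.List.pyRange a (a + (lens.length : Int)) 1).map (fun i => (i, pvBlank)) = pvInit lens a := by
  induction lens generalizing a with
  | nil => simp [pvInit, PySem.List.pyRange_one_eq_nil]
  | cons x r ih =>
      have hlen : a + ((x :: r).length : Int) = (a + 1) + (r.length : Int) := by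
        simp [List.length_cons]; ring
      rw [hlen, PySem.List.pyRange_one_cons (by omega)]
      simp only [List.map_cons, pvInit]
      rw [ih (a + 1)]

theorem pvSetKey_keys (d : List (Int × List (String × Int × Int))) (k : Int) (f : List (String × Int × Int) → List (String × Int × Int)) :
    (pvSetKey d k f).map (·.1) = d.map (·.1) := by
  induction d with
  | nil => rfl
  | cons x r ih => by_cases h : x.1 = k <;> simp [pvSetKey, h, ih]

theorem pvSetKey_append_left (d t : List (Int × List (String × Int × Int))) (k : Int) (f : List (String × Int × Int) → List (String × Int × Int))
    (h : k ∈ d.map (·.1)) : pvSetKey (d ++ t) k f = pvSetKey d k f ++ t := by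
  induction d with
  | nil => simp at h
  | cons x r ih =>
      obtain ⟨k', v⟩ := x
      by_cases hx : k' = k
      · simp [pvSetKey, hx]
      · simp only [List.map_cons, List.mem_cons] at h
        have h' : k ∈ r.map (·.1) := by
          rcases h with h | h
          · exact absurd h.symm hx
          · exact h
        simp [pvSetKey, hx, ih h']

theorem pvSetKey_append_right (d t : List (Int × List (String × Int × Int))) (k : Int) (f : List (String × Int × Int) → List (String × Int × Int))
    (h : k ∉ d.map (·.1)) : pvSetKey (d ++ t) k f = d ++ pvSetKey t k f := by
  induction d with
  | nil => simp
  | cons x r ih =>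
      obtain ⟨k', v⟩ := x
      simp only [List.map_cons, List.mem_cons, not_or] at h
      have hx : ¬ k' = k := fun e => h.1 e.symm
      simp [pvSetKey, hx, ih h.2]

theorem pvSpecL_keys (lens : List Int) (a cell : Int) :
    ∀ k ∈ (pvSpecL lens a cell).map (·.1), a ≤ k ∧ k < a + (lens.length : Int) := by
  induction lens generalizing a cell with
  | nil => simp [pvSpecL]
  | cons x r ih =>
      intro k hk
      simp only [pvSpecL, List.map_cons, List.mem_cons] at hk
      simp only [List.length_cons]
      push_cast
      rcases hk with hk | hk
      · subst hk; omega
      · have := ih (a + 1) (cell + x + 1) k hk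
        omega

theorem pvSpecL_append (xs : List Int) (len : Int) : ∀ (a cell : Int),
    pvSpecL (xs ++ [len]) a cell =
      pvSpecL xs a cell ++ [(a + (xs.length : Int),
        [("start_variant_coords", cell + pvS xs, cell + pvS xs + len - 1), ("end_variant_coords", 0, 0)])] := by
  induction xs with
  | nil => intro a cell; simp [pvSpecL, pvS]
  | cons x r ih =>
      intro a cell
      simp only [List.cons_append, pvSpecL, ih (a + 1) (cell + x + 1), pvS, List.length_cons]
      push_cast
      ring_nf

theorem pvRowB_append (xs : List Int) (len : Int) : ∀ (a cell off : Int),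
    pvRowB (xs ++ [len]) a cell off =
      pvRowB xs a cell off ++ [(a + (xs.length : Int),
        [("start_variant_coords", cell + pvS xs, cell + pvS xs + len - 1),
         ("end_variant_coords", cell + pvS xs + off, cell + pvS xs + len - 1 + off)])] := by
  induction xs with
  | nil => intro a cell off; simp [pvRowB, pvS]
  | cons x r ih =>
      intro a cell off
      simp only [List.cons_append, pvRowB, ih (a + 1) (cell + x + 1) off, pvS, List.length_cons]
      push_cast
      ring_nf

-- A's left loop computes pvSpecL: a clean frame lemma first
theorem pvFoldL_frame (lens : List Int) : ∀ (a : Int) (x : Int × List (String × Int × Int)) (d : List (Int × List (String × Int × Int))) (cell : Int),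
    x.1 < a →
    (PySem.List.enumerate lens a).foldl pvStepL (x :: d, cell) =
      (x :: ((PySem.List.enumerate lens a).foldl pvStepL (d, cell)).1,
       ((PySem.List.enumerate lens a).foldl pvStepL (d, cell)).2) := by
  induction lens with
  | nil => intro a x d cell _; simp [PySem.List.enumerate_nil]
  | cons len rest ih =>
      intro a x d cell hx
      rw [PySem.List.enumerate_cons]
      simp only [List.foldl_cons]
      have hset : pvSetKey (x :: d) a (fun dd => pvSetStr dd "start_variant_coords" (cell, cell + len - 1)) =
          x :: pvSetKey d a (fun dd => pvSetStr dd "start_variant_coords" (cell, cell + len - 1)) := by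
        obtain ⟨k, v⟩ := x
        simp only [pvSetKey]
        rw [if_neg (by simp at hx ⊢; omega)]
      simp only [pvStepL, hset]
      exact ih (a + 1) x _ (cell + len + 1) (by omega)

theorem pvFoldL_eq (lens : List Int) : ∀ (a cell : Int),
    ((PySem.List.enumerate lens a).foldl pvStepL (pvInit lens a, cell)).1 = pvSpecL lens a cell := by
  induction lens with
  | nil => intro a cell; simp [PySem.List.enumerate_nil, pvInit, pvSpecL]
  | cons len rest ih =>
      intro a cell
      rw [PySem.List.enumerate_cons]
      simp only [List.foldl_cons, pvInit, pvStepL, pvSetKey, if_true]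
      rw [pvFoldL_frame rest (a + 1) (a, pvSetStr pvBlank "start_variant_coords" (cell, cell + len - 1))
        (pvInit rest (a + 1)) (cell + len + 1) (lt_add_one a)]
      simp only [pvSpecL]
      congr 1
      exact ih (a + 1) (cell + len + 1)

-- frame for the right loop: an appended tail whose keys are never touched passes through
theorem pvFoldR_frame (lens : List Int) : ∀ (s n : Int) (d t : List (Int × List (String × Int × Int))) (cr : Int),
    (∀ i : Int, s ≤ i → i < s + (lens.length : Int) → (n - i - 1) ∈ d.map (·.1)) →
    (PySem.List.enumerate lens s).foldl (pvStepR n) (d ++ t, cr) =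
      (((PySem.List.enumerate lens s).foldl (pvStepR n) (d, cr)).1 ++ t,
       ((PySem.List.enumerate lens s).foldl (pvStepR n) (d, cr)).2) := by
  induction lens with
  | nil => intro s n d t cr _; simp [PySem.List.enumerate_nil]
  | cons len rest ih =>
      intro s n d t cr h
      rw [PySem.List.enumerate_cons]
      simp only [List.foldl_cons, pvStepR]
      rw [pvSetKey_append_left d t (n - s - 1) _ (h s le_rfl (by simp only [List.length_cons]; push_cast; omega))]
      rw [ih (s + 1) n _ t (cr - len - 1) (by
        intro i h1 h2
        rw [pvSetKey_keys]
        refine h i (by omega) ?_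
        simp only [List.length_cons]
        push_cast at h2 ⊢
        omega)]

-- the right loop on pvSpecL produces exactly B's row, with the shift off = cr + 2 - cell - pvS
theorem pvS_append (ys : List Int) (len : Int) : pvS (ys ++ [len]) = pvS ys + len + 1 := by
  induction ys with
  | nil => simp [pvS]
  | cons x r ih => simp [pvS, ih]; ring

theorem pvSpecL_mem_keys (lens : List Int) : ∀ (a cell k : Int), a ≤ k → k < a + (lens.length : Int) →
    k ∈ (pvSpecL lens a cell).map (·.1) := by
  induction lens with
  | nil =>
      intro a cell k h1 h2
      simp only [List.length_nil] at h2
      exact absurd h2 (by omega)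
  | cons x r ih =>
      intro a cell k h1 h2
      simp only [pvSpecL, List.map_cons, List.mem_cons]
      by_cases hk : k = a
      · exact Or.inl hk
      · refine Or.inr (ih (a + 1) (cell + x + 1) k (by omega) ?_)
        simp only [List.length_cons] at h2
        push_cast at h2 ⊢
        omega

theorem pvFoldR_eq (lens : List Int) : ∀ (s n a cell cr : Int), n - s = a + (lens.length : Int) →
    (PySem.List.enumerate lens.reverse s).foldl (pvStepR n) (pvSpecL lens a cell, cr) =
      (pvRowB lens a cell (cr + 2 - cell - pvS lens), cr - pvS lens) := by
  induction lens using List.reverseRecOn with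
  | nil => intro s n a cell cr _; simp [PySem.List.enumerate_nil, pvSpecL, pvRowB, pvS]
  | append_singleton ys len ih =>
      intro s n a cell cr h
      rw [List.reverse_append, List.reverse_singleton, List.singleton_append, PySem.List.enumerate_cons]
      simp only [List.foldl_cons, pvStepR]
      have hkey : n - s - 1 = a + (ys.length : Int) := by
        simp only [List.length_append, List.length_cons, List.length_nil] at h
        push_cast at h; omega
      rw [pvSpecL_append, hkey]
      rw [pvSetKey_append_right _ _ _ _ (by
        intro hmem
        have := pvSpecL_keys ys a cell _ hmem
        omega)]
      have hsingle : pvSetKey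
          [(a + (ys.length : Int), [("start_variant_coords", cell + pvS ys, cell + pvS ys + len - 1), ("end_variant_coords", 0, 0)])]
          (a + (ys.length : Int)) (fun dd => pvSetStr dd "end_variant_coords" (cr - len + 1, cr)) =
          [(a + (ys.length : Int), [("start_variant_coords", cell + pvS ys, cell + pvS ys + len - 1), ("end_variant_coords", cr - len + 1, cr)])] := by
        simp [pvSetKey, pvSetStr]
      rw [hsingle]
      rw [pvFoldR_frame ys.reverse (s + 1) n _ _ (cr - len - 1) (by
        intro i h1 h2
        simp only [List.length_reverse] at h2
        exact pvSpecL_mem_keys ys a cell _ (by omega) (by omega))]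
      rw [ih (s + 1) n a cell (cr - len - 1) (by omega)]
      rw [pvS_append, pvRowB_append]
      have hoff : cr + 2 - cell - (pvS ys + len + 1) = cr - len - 1 + 2 - cell - pvS ys := by ring
      rw [hoff]
      have e1 : cell + pvS ys + (cr - len - 1 + 2 - cell - pvS ys) = cr - len + 1 := by ring
      have e2 : cell + pvS ys + len - 1 + (cr - len - 1 + 2 - cell - pvS ys) = cr := by ring
      have e3 : cr - (pvS ys + len + 1) = cr - len - 1 - pvS ys := by ring
      rw [e1, e2, e3]

theorem pvRow_eq (rule_row : List Int) (board_size : Int) :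
    pvRowA rule_row board_size = pvRowB rule_row 0 0 (board_size - (rule_row.sum + (rule_row.length : Int) - 1)) := by
  unfold pvRowA
  simp only
  have hinit : (PySem.List.pyRange 0 (rule_row.length : Int) 1).map (fun i => (i, pvBlank)) = pvInit rule_row 0 := by
    have := pvInit_eq rule_row 0
    rw [zero_add] at this
    exact this
  rw [hinit, pvFoldL_eq rule_row 0 0]
  have := pvFoldR_eq rule_row 0 (rule_row.length : Int) 0 0 (board_size - 1) (by omega)
  rw [this]
  simp only
  have : board_size - 1 + 2 - 0 - pvS rule_row = board_size - (rule_row.sum + (rule_row.length : Int) - 1) := by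
    rw [pvS_eq]; ring
  rw [this]

-- ===== VERDICT (by name: the statement is the Claim_ definition above) =====
theorem find_sausages_possible_edge_variants_py_spec : Claim_equal_find_sausages_possible_edge_variants_py := by
  intro rules board_size _
  unfold Spec_find_sausages_possible_edge_variants_py
  unfold find_sausages_possible_edge_variants_py find_sausages_possible_edge_variants_py_alt
  rw [PySem.List.foldl_append_singleton_eq_map]
  exact List.map_congr_left (fun r _ => pvRow_eq r board_size)
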